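-- pv_equiv track=rewrite | github.com/jahnabiroy/COL216 | Assignment 2/A - Ripple Carry Adder/test-vector_generator.py | adder_4bit
-- ===== SOURCE A (Python) =====
-- def adder_4bit(a, b):
--     # 4-bit adder function
--     carry = 0
--     result = 0
--     for i in range(4):
--         bit_a = (a >> i) & 1
--         bit_b = (b >> i) & 1
--
--         # Calculate sum and carry
--         bit_sum = bit_a ^ bit_b ^ carry
--         carry = (bit_a & bit_b) | ((bit_a ^ bit_b) & carry)
--
--         # Update result
--         result |= (bit_sum << i)
--
--     return result, carry
-- ===== SOURCE B (Python) =====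
-- def adder_4bit(a, b):
--     # closed form: mask both operands to 4 bits, one addition, split sum and carry-out
--     s = a % 16 + b % 16
--     return s % 16, s // 16
-- ===== Notes on version B (the rewrite author's own statement) =====
-- stated objective: simpler
-- what changed: Replaced the bit-serial ripple-carry loop (per-bit xor/and carry propagation) with one closed-form addition of the operands reduced mod 16, returning (s % 16, s // 16).
import Mathlib
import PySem

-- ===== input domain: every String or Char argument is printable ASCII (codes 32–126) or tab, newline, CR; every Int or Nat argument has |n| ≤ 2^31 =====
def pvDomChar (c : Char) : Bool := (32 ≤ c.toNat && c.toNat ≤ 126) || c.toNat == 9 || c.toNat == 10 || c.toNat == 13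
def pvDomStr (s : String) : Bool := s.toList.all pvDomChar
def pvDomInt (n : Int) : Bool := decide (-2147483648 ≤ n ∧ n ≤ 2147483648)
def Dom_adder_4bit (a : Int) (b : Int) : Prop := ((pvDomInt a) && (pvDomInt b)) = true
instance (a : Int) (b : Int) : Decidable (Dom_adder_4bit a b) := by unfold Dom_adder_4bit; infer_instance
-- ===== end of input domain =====

-- B replaces A's bit-serial ripple-carry loop by a single closed-form addition mod 16 (objective: simpler).

-- B replaces A's bit-serial ripple-carry loop with one closed-form addition of the operands mod 16 (objective: simpler).

-- ===== PORT A =====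
-- literal port of the loop: state (result, carry); i.toNat is exact since i ranges over 0..3
def adder_4bit (a : Int) (b : Int) : Int × Int :=
  let rc := (PySem.List.pyRange 0 4 1).foldl
    (fun (st : Int × Int) (i : Int) =>
      let result := st.1
      let carry := st.2
      let bit_a := PySem.Int.band (a >>> i.toNat) 1
      let bit_b := PySem.Int.band (b >>> i.toNat) 1
      let bit_sum := PySem.Int.bxor (PySem.Int.bxor bit_a bit_b) carry
      let carry' := PySem.Int.bor (PySem.Int.band bit_a bit_b)
                      (PySem.Int.band (PySem.Int.bxor bit_a bit_b) carry)
      let result' := PySem.Int.bor result (bit_sum <<< i.toNat)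
      (result', carry'))
    ((0 : Int), (0 : Int))
  (rc.1, rc.2)

def adder_4bit_alt (a : Int) (b : Int) : Int × Int :=
  let s := PySem.Int.mod a 16 + PySem.Int.mod b 16
  (PySem.Int.mod s 16, PySem.Int.floordiv s 16)


-- ===== PRECONDITION & SPEC =====
def Spec_adder_4bit (a : Int) (b : Int) (out : Int × Int) : Prop := out = adder_4bit_alt a b
instance (a : Int) (b : Int) (out : Int × Int) : Decidable (Spec_adder_4bit a b out) := by unfold Spec_adder_4bit; infer_instance

-- ===== CLAIM (what is proved, stated in full; the proofs are below) =====
def Claim_equal_adder_4bit : Prop := ∀ (a : Int) (b : Int), Dom_adder_4bit a b → Spec_adder_4bit a b (adder_4bit a b)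

-- ===== LEMMAS AND PROOFS =====

theorem bit_mod16 (x : Int) (k : Nat) (hk : k < 4) :
    PySem.Int.band (x >>> k) 1 = PySem.Int.band ((x % 16) >>> k) 1 := by
  rw [PySem.Int.band_one, PySem.Int.band_one,
      PySem.Int.mod_eq_emod_of_pos (by norm_num), PySem.Int.mod_eq_emod_of_pos (by norm_num)]
  cases x with
  | ofNat n =>
      have h : ((Int.ofNat n) % 16) = ((n % 16 : Nat) : Int) := by
        simp [Int.ofNat_eq_natCast]
      rw [h]
      have h1 : (Int.ofNat n) >>> k = ((n >>> k : Nat) : Int) := rfl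
      have h2 : ((n % 16 : Nat) : Int) >>> k = (((n % 16) >>> k : Nat) : Int) := rfl
      rw [h1, h2]
      rw [Nat.shiftRight_eq_div_pow, Nat.shiftRight_eq_div_pow]
      interval_cases k <;> omega
  | negSucc n =>
      have h : ((Int.negSucc n) % 16) = ((15 - n % 16 : Nat) : Int) := by
        rw [Int.negSucc_eq]; omega
      rw [h]
      have h1 : (Int.negSucc n) >>> k = Int.negSucc (n >>> k) := rfl
      have h2 : ((15 - n % 16 : Nat) : Int) >>> k = (((15 - n % 16) >>> k : Nat) : Int) := rfl
      rw [h1, h2, Int.negSucc_eq]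
      rw [Nat.shiftRight_eq_div_pow, Nat.shiftRight_eq_div_pow]
      interval_cases k <;> omega

theorem bit0_mod16 (x : Int) : PySem.Int.band x 1 = PySem.Int.band (x % 16) 1 := by
  have h := bit_mod16 x 0 (by norm_num)
  simpa using h

theorem adder_mod16 (a b : Int) :
    adder_4bit a b = adder_4bit (a % 16) (b % 16) := by
  simp only [adder_4bit, show PySem.List.pyRange 0 4 1 = [0,1,2,3] from rfl, List.foldl]
  norm_num
  simp only [show Int.toNat 2 = 2 from rfl, show Int.toNat 3 = 3 from rfl]
  rw [bit0_mod16 a, bit_mod16 a 1 (by norm_num), bit_mod16 a 2 (by norm_num),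
      bit_mod16 a 3 (by norm_num), bit0_mod16 b, bit_mod16 b 1 (by norm_num),
      bit_mod16 b 2 (by norm_num), bit_mod16 b 3 (by norm_num)]
  rw [bit0_mod16 (a % 16), bit_mod16 (a % 16) 1 (by norm_num),
      bit_mod16 (a % 16) 2 (by norm_num), bit_mod16 (a % 16) 3 (by norm_num),
      bit0_mod16 (b % 16), bit_mod16 (b % 16) 1 (by norm_num),
      bit_mod16 (b % 16) 2 (by norm_num), bit_mod16 (b % 16) 3 (by norm_num)]
  simp [Int.emod_emod_of_dvd]

theorem alt_mod16 (a b : Int) :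
    adder_4bit_alt a b = adder_4bit_alt (a % 16) (b % 16) := by
  simp [adder_4bit_alt, Int.emod_emod_of_dvd]

theorem adder_core (m n : Nat) (hm : m < 16) (hn : n < 16) :
    adder_4bit (m : Int) (n : Int) = adder_4bit_alt (m : Int) (n : Int) := by
  interval_cases m <;> interval_cases n <;> decide

-- ===== VERDICT (by name: the statement is the Claim_ definition above) =====
theorem adder_4bit_spec : Claim_equal_adder_4bit := by
  intro a b _
  unfold Spec_adder_4bit
  have ha1 : 0 ≤ a % 16 := Int.emod_nonneg a (by norm_num)
  have ha2 : a % 16 < 16 := Int.emod_lt_of_pos a (by norm_num)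
  have hb1 : 0 ≤ b % 16 := Int.emod_nonneg b (by norm_num)
  have hb2 : b % 16 < 16 := Int.emod_lt_of_pos b (by norm_num)
  have ham : a % 16 = ((a % 16).toNat : Int) := by omega
  have hbm : b % 16 = ((b % 16).toNat : Int) := by omega
  rw [adder_mod16, alt_mod16, ham, hbm]
  exact adder_core _ _ (by omega) (by omega)
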